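-- pv_equiv track=rewrite | github.com/szymno/example_algorithms | spell_checking.py | insert_delete_distance
-- ===== SOURCE A (Python) =====
-- def insert_delete_distance(string_1, string_2):
--     length_1 = len(string_1)
--     length_2 = len(string_2)
--     matrix = [(length_1 + 1) * [0] for _ in range(length_2 + 1)]
--
--     for j, char_1 in enumerate(string_1, start=1):
--         for i, char_2 in enumerate(string_2, start=1):
--             if char_1 == char_2:
--                 matrix[i][j] = matrix[i - 1][j - 1] + 1
--             else:
--                 matrix[i][j] = max(matrix[i - 1][j],
--                                    matrix[i][j - 1])
--
--     return abs(length_1 + length_2 - 2 * matrix[-1][-1])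
-- ===== SOURCE B (Python) =====
-- def insert_delete_distance(string_1, string_2):
--     # Direct insert/delete DP with a rolling row: prev[j] is the distance
--     # between string_2[:i] and string_1[:j]; no LCS table, no final formula.
--     prev = list(range(len(string_1) + 1))
--     for i, char_2 in enumerate(string_2, start=1):
--         cur = [i]
--         for j, char_1 in enumerate(string_1, start=1):
--             if char_1 == char_2:
--                 cur.append(prev[j - 1])
--             else:
--                 cur.append(1 + min(prev[j], cur[j - 1]))
--         prev = cur
--     return prev[-1]
-- ===== Notes on version B (the rewrite author's own statement) =====
-- stated objective: alternative
-- what changed: B computes the insert/delete distance directly with a rolling one-row DP (first row 0..n, each cell keeps the distance itself via 1+min) instead of A's full (n+1)x(m+1) LCS matrix followed by the len1+len2-2*LCS formula with abs.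
import Mathlib
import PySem

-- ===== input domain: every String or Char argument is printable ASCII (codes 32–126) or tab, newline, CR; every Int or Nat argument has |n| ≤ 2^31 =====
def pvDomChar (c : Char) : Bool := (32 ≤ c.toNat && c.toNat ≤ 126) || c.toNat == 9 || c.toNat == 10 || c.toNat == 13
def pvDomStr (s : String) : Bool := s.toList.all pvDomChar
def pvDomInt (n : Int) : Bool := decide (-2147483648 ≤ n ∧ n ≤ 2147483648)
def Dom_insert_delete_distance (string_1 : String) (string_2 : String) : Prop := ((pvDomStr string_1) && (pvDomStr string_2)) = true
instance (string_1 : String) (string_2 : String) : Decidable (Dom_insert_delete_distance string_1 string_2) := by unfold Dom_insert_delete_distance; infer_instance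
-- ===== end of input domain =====

-- B replaces A's full LCS matrix plus the len1+len2-2*LCS formula by a rolling
-- one-row DP that maintains the insert/delete distance itself (O(m) space).

-- ===== PORT A =====
-- helper: the body of A's inner 'for i, char_2 in enumerate(string_2, 1)' loop
def pvA_inner (c1 : Char) (j : Int) (matrix : List (List Int)) (ic : Int × Char) : List (List Int) :=
  let i := ic.1
  let v : Int :=
    if c1 == ic.2 then
      PySem.List.pyGetD (PySem.List.pyGetD matrix (i - 1) []) (j - 1) 0 + 1
    else
      max (PySem.List.pyGetD (PySem.List.pyGetD matrix (i - 1) []) j 0)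
          (PySem.List.pyGetD (PySem.List.pyGetD matrix i []) (j - 1) 0)
  PySem.List.pySetD matrix i (PySem.List.pySetD (PySem.List.pyGetD matrix i []) j v)

-- helper: the body of A's outer 'for j, char_1 in enumerate(string_1, 1)' loop
def pvA_outer (string_2 : String) (matrix : List (List Int)) (jc : Int × Char) : List (List Int) :=
  (PySem.List.enumerate string_2.toList 1).foldl (pvA_inner jc.2 jc.1) matrix

def insert_delete_distance (string_1 : String) (string_2 : String) : Int :=
  let length_1 := PySem.Str.len string_1
  let length_2 := PySem.Str.len string_2
  let matrix : List (List Int) :=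
    (PySem.List.pyRange 0 (length_2 + 1) 1).map (fun _ => List.replicate (length_1 + 1).toNat 0)
  let matrix := (PySem.List.enumerate string_1.toList 1).foldl (pvA_outer string_2) matrix
  |length_1 + length_2 - 2 * PySem.List.pyGetD (PySem.List.pyGetD matrix (-1) []) (-1) 0|

-- ===== PORT B =====
-- helper: the body of B's inner 'for j, char_1 in enumerate(string_1, 1)' loop
def pvB_inner (c2 : Char) (prev : List Int) (cur : List Int) (jc : Int × Char) : List Int :=
  if jc.2 == c2 then
    cur ++ [PySem.List.pyGetD prev (jc.1 - 1) 0]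
  else
    cur ++ [1 + min (PySem.List.pyGetD prev jc.1 0) (PySem.List.pyGetD cur (jc.1 - 1) 0)]

-- helper: the body of B's outer 'for i, char_2 in enumerate(string_2, 1)' loop
def pvB_outer (string_1 : String) (prev : List Int) (ic : Int × Char) : List Int :=
  (PySem.List.enumerate string_1.toList 1).foldl (pvB_inner ic.2 prev) [ic.1]

def insert_delete_distance_alt (string_1 : String) (string_2 : String) : Int :=
  let prev : List Int := PySem.List.pyRange 0 (PySem.Str.len string_1 + 1) 1
  let prev := (PySem.List.enumerate string_2.toList 1).foldl (pvB_outer string_1) prev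
  PySem.List.pyGetD prev (-1) 0

-- ===== PRECONDITION & SPEC =====
def Spec_insert_delete_distance (string_1 : String) (string_2 : String) (out : Int) : Prop := out = insert_delete_distance_alt string_1 string_2
instance (string_1 : String) (string_2 : String) (out : Int) : Decidable (Spec_insert_delete_distance string_1 string_2 out) := by unfold Spec_insert_delete_distance; infer_instance

-- ===== CLAIM (what is proved, stated in full; the proofs are below) =====
def Claim_equal_insert_delete_distance : Prop := ∀ (string_1 : String) (string_2 : String), Dom_insert_delete_distance string_1 string_2 → Spec_insert_delete_distance string_1 string_2 (insert_delete_distance string_1 string_2)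

-- ===== LEMMAS AND PROOFS =====

-- LCS length of string_2[:i] and string_1[:j]  (i indexes b = string_2, j indexes a = string_1)
def pvLcs (a b : List Char) : Nat → Nat → Nat
  | 0, _ => 0
  | _ + 1, 0 => 0
  | i + 1, j + 1 =>
      if a.getD j ' ' == b.getD i ' ' then pvLcs a b i j + 1
      else max (pvLcs a b i (j + 1)) (pvLcs a b (i + 1) j)
  termination_by i j => i + j

-- insert/delete distance of string_2[:i] and string_1[:j]
def pvD (a b : List Char) : Nat → Nat → Nat
  | 0, j => j
  | i + 1, 0 => i + 1
  | i + 1, j + 1 =>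
      if a.getD j ' ' == b.getD i ' ' then pvD a b i j
      else 1 + min (pvD a b i (j + 1)) (pvD a b (i + 1) j)
  termination_by i j => i + j

lemma pvD_add_two_lcs (a b : List Char) : ∀ i j, pvD a b i j + 2 * pvLcs a b i j = i + j := by
  intro i
  induction i with
  | zero => intro j; simp [pvD, pvLcs]
  | succ i ih =>
    intro j
    induction j with
    | zero => simp [pvD, pvLcs]
    | succ j ihj =>
      rw [pvD, pvLcs]
      have h1 := ih j
      have h2 := ih (j + 1)
      split_ifs with h
      · omega
      · omega

lemma pv_set_map_range {α : Type} (n i : Nat) (f : Nat → α) (v : α) :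
    ((List.range n).map f).set i v = (List.range n).map (fun t => if t = i then v else f t) := by
  apply List.ext_getElem
  · simp
  · intro t h1 h2
    simp only [List.getElem_set, List.getElem_map, List.getElem_range]
    rcases eq_or_ne t i with ht | ht
    · simp [ht]
    · simp [ht, Ne.symm ht]

lemma pv_map_range_congr {α : Type} (n : Nat) (f g : Nat → α) (h : ∀ t, t < n → f t = g t) :
    (List.range n).map f = (List.range n).map g := by
  apply List.map_congr_left
  intro t ht
  exact h t (List.mem_range.mp ht)

-- the interleaved matrix while A fills column jcol, rows 1..s already updated
def pvEI (a b : List Char) (jcol s i j : Nat) : Int :=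
  if j < jcol ∨ (j = jcol ∧ i ≤ s) then (pvLcs a b i j : Int) else 0

-- the matrix after A has completed columns 1..t
def pvEA (a b : List Char) (t i j : Nat) : Int :=
  if j ≤ t then (pvLcs a b i j : Int) else 0

def pvMat (a b : List Char) (e : Nat → Nat → Int) : List (List Int) :=
  (List.range (b.length + 1)).map (fun i => (List.range (a.length + 1)).map (fun j => e i j))

lemma pvA_inner_step (a b : List Char) (k s : Nat) (hk : k < a.length) (hs : s < b.length) :
    pvA_inner (a[k]) ((k : Int) + 1) (pvMat a b (pvEI a b (k + 1) s)) (((s : Int) + 1), b[s])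
      = pvMat a b (pvEI a b (k + 1) (s + 1)) := by
  have e3 : ((s : Int) + 1) = (((s + 1 : Nat)) : Int) := by push_cast; ring
  have e4 : ((k : Int) + 1) = (((k + 1 : Nat)) : Int) := by push_cast; ring
  have e1 : (((s + 1 : Nat) : Int) - 1) = ((s : Nat) : Int) := by push_cast; ring
  have e2 : (((k + 1 : Nat) : Int) - 1) = ((k : Nat) : Int) := by push_cast; ring
  simp only [pvA_inner, pvMat, e3, e4, e1, e2, PySem.List.pyGetD_natCast,
    PySem.List.pySetD_natCast]
  have hrow : ∀ (i : Nat), i < b.length + 1 →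
      ((List.range (b.length + 1)).map
        (fun i => (List.range (a.length + 1)).map (fun j => pvEI a b (k + 1) s i j))).getD i []
      = (List.range (a.length + 1)).map (fun j => pvEI a b (k + 1) s i j) :=
    fun i hi => PySem.List.getD_map_range _ _ _ _ hi
  have hcell : ∀ (i j : Nat), j < a.length + 1 →
      ((List.range (a.length + 1)).map (fun j => pvEI a b (k + 1) s i j)).getD j 0
      = pvEI a b (k + 1) s i j :=
    fun i j hj => PySem.List.getD_map_range _ _ _ _ hj
  rw [hrow s (by omega), hrow (s + 1) (by omega), hcell s k (by omega),
    hcell s (k + 1) (by omega), hcell (s + 1) k (by omega)]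
  have v1 : pvEI a b (k + 1) s s k = (pvLcs a b s k : Int) := by
    unfold pvEI; rw [if_pos]; omega
  have v2 : pvEI a b (k + 1) s s (k + 1) = (pvLcs a b s (k + 1) : Int) := by
    unfold pvEI; rw [if_pos]; omega
  have v3 : pvEI a b (k + 1) s (s + 1) k = (pvLcs a b (s + 1) k : Int) := by
    unfold pvEI; rw [if_pos]; omega
  rw [v1, v2, v3]
  have hrec : (pvLcs a b (s + 1) (k + 1) : Int)
      = if a[k] == b[s] then (pvLcs a b s k : Int) + 1
        else max (pvLcs a b s (k + 1) : Int) (pvLcs a b (s + 1) k : Int) := by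
    rw [pvLcs, List.getD_eq_getElem _ _ hk, List.getD_eq_getElem _ _ hs]
    split_ifs with h <;> push_cast <;> ring
  rw [← hrec]
  rw [pv_set_map_range, pv_set_map_range]
  apply pv_map_range_congr
  intro i hi
  by_cases hie : i = s + 1
  · subst hie
    rw [if_pos rfl]
    apply pv_map_range_congr
    intro j hj
    by_cases hje : j = k + 1
    · subst hje
      rw [if_pos rfl]
      unfold pvEI
      rw [if_pos]; omega
    · rw [if_neg hje]
      unfold pvEI
      split_ifs <;> first | rfl | (exfalso; omega)
  · rw [if_neg hie]
    apply pv_map_range_congr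
    intro j hj
    unfold pvEI
    split_ifs <;> first | rfl | (exfalso; omega)

lemma pvA_inner_loop (a b : List Char) (k : Nat) (hk : k < a.length) :
    ∀ (s : Nat), s ≤ b.length →
    (PySem.List.enumerate (b.drop s) ((s : Int) + 1)).foldl (pvA_inner (a[k]) ((k : Int) + 1))
        (pvMat a b (pvEI a b (k + 1) s))
      = pvMat a b (pvEI a b (k + 1) b.length) := by
  intro s hs
  induction hd : b.length - s generalizing s with
  | zero =>
    have hse : s = b.length := by omega
    subst hse
    simp
  | succ r ih =>
    have hslt : s < b.length := by omega
    rw [List.drop_eq_getElem_cons hslt, PySem.List.enumerate_cons, List.foldl_cons,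
      pvA_inner_step a b k s hk hslt]
    have e3 : ((s : Int) + 1 + 1) = (((s + 1 : Nat)) : Int) + 1 := by push_cast; ring
    rw [e3]
    exact ih (s + 1) (by omega) (by omega)

lemma pvA_outer_loop (string_2 : String) (a b : List Char) (hb : b = string_2.toList) :
    ∀ (k : Nat), k ≤ a.length →
    (PySem.List.enumerate (a.drop k) ((k : Int) + 1)).foldl (pvA_outer string_2)
        (pvMat a b (pvEA a b k))
      = pvMat a b (pvEA a b a.length) := by
  intro k hk
  induction hd : a.length - k generalizing k with
  | zero =>
    have hke : k = a.length := by omega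
    subst hke
    simp
  | succ r ih =>
    have hklt : k < a.length := by omega
    rw [List.drop_eq_getElem_cons hklt, PySem.List.enumerate_cons, List.foldl_cons]
    have hstep : pvA_outer string_2 (pvMat a b (pvEA a b k)) (((k : Int) + 1), a[k])
        = pvMat a b (pvEA a b (k + 1)) := by
      unfold pvA_outer
      have h0 : pvMat a b (pvEA a b k) = pvMat a b (pvEI a b (k + 1) 0) := by
        unfold pvMat
        apply pv_map_range_congr; intro i hi
        apply pv_map_range_congr; intro j hj
        unfold pvEA pvEI
        rcases Nat.eq_zero_or_pos i with hi0 | hi0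
        · subst hi0
          split_ifs <;> first | rfl | (exfalso; omega) | simp [pvLcs]
        · split_ifs <;> first | rfl | (exfalso; omega)
      have hen : PySem.List.enumerate string_2.toList 1
          = PySem.List.enumerate (b.drop 0) (((0 : Nat) : Int) + 1) := by
        rw [hb]; norm_num
      rw [h0, hen, pvA_inner_loop a b k hklt 0 (by omega)]
      unfold pvMat
      apply pv_map_range_congr; intro i hi
      apply pv_map_range_congr; intro j hj
      unfold pvEA pvEI
      split_ifs <;> first | rfl | (exfalso; omega)
    rw [hstep]
    have e3 : ((k : Int) + 1 + 1) = (((k + 1 : Nat)) : Int) + 1 := by push_cast; ring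
    rw [e3]
    exact ih (k + 1) (by omega) (by omega)

lemma pvLcs_zero_right (a b : List Char) (i : Nat) : pvLcs a b i 0 = 0 := by
  cases i <;> simp [pvLcs]

lemma pvA_eq (string_1 string_2 : String) :
    insert_delete_distance string_1 string_2
      = (pvD string_1.toList string_2.toList string_2.toList.length string_1.toList.length : Int) := by
  set a := string_1.toList with ha
  set b := string_2.toList with hb
  simp only [insert_delete_distance]
  have hinit : (PySem.List.pyRange 0 (PySem.Str.len string_2 + 1) 1).map
      (fun _ => List.replicate (PySem.Str.len string_1 + 1).toNat (0 : Int))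
      = pvMat a b (pvEA a b 0) := by
    rw [PySem.Str.len_eq, PySem.Str.len_eq, PySem.List.pyRange_one]
    have h1 : (((b.length : Int) + 1) - 0).toNat = b.length + 1 := by omega
    have h2 : ((a.length : Int) + 1).toNat = a.length + 1 := by omega
    rw [h1, h2, List.map_map]
    unfold pvMat
    apply pv_map_range_congr; intro i hi
    have : ∀ j, j < a.length + 1 → pvEA a b 0 i j = (fun _ => (0 : Int)) j := by
      intro j hj
      unfold pvEA
      split_ifs with h
      · have : j = 0 := by omega
        subst this
        simp [pvLcs_zero_right]
      · rfl
    rw [pv_map_range_congr _ _ _ this]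
    simp [List.map_const']
  have hen : PySem.List.enumerate string_1.toList 1
      = PySem.List.enumerate (a.drop 0) (((0 : Nat) : Int) + 1) := by
    rw [ha]; norm_num
  rw [hinit, hen, pvA_outer_loop string_2 a b hb 0 (by omega)]
  unfold pvMat
  rw [show List.range (b.length + 1) = List.range b.length ++ [b.length] from List.range_succ]
  simp only [List.map_append, List.map_cons, List.map_nil]
  rw [PySem.List.pyGetD_neg_one_append_singleton]
  rw [show List.range (a.length + 1) = List.range a.length ++ [a.length] from List.range_succ]
  simp only [List.map_append, List.map_cons, List.map_nil]
  rw [PySem.List.pyGetD_neg_one_append_singleton]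
  have hcell : pvEA a b a.length b.length a.length = (pvLcs a b b.length a.length : Int) := by
    unfold pvEA; rw [if_pos (le_refl _)]
  rw [hcell, PySem.Str.len_eq, PySem.Str.len_eq]
  have key := pvD_add_two_lcs a b b.length a.length
  have hval : ((a.length : Int)) + (b.length : Int) - 2 * (pvLcs a b b.length a.length : Int)
      = (pvD a b b.length a.length : Int) := by omega
  rw [hval]
  exact abs_of_nonneg (by positivity)

def pvRow (a b : List Char) (i : Nat) : List Int :=
  (List.range (a.length + 1)).map (fun j => (pvD a b i j : Int))

lemma pvB_inner_loop (a b : List Char) (s : Nat) (hs : s < b.length) :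
    ∀ (k : Nat), k ≤ a.length →
    (PySem.List.enumerate (a.drop k) ((k : Int) + 1)).foldl (pvB_inner (b[s]) (pvRow a b s))
        ((List.range (k + 1)).map (fun j => (pvD a b (s + 1) j : Int)))
      = pvRow a b (s + 1) := by
  intro k hk
  induction hd : a.length - k generalizing k with
  | zero =>
    have hke : k = a.length := by omega
    subst hke
    simp [pvRow]
  | succ r ih =>
    have hklt : k < a.length := by omega
    rw [List.drop_eq_getElem_cons hklt, PySem.List.enumerate_cons, List.foldl_cons]
    have hstep : pvB_inner (b[s]) (pvRow a b s)
        ((List.range (k + 1)).map (fun j => (pvD a b (s + 1) j : Int))) (((k : Int) + 1), a[k])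
        = (List.range (k + 1 + 1)).map (fun j => (pvD a b (s + 1) j : Int)) := by
      unfold pvB_inner pvRow
      have e1 : ((k : Int) + 1 - 1) = ((k : Nat) : Int) := by ring
      have e2 : ((k : Int) + 1) = (((k + 1 : Nat)) : Int) := by push_cast; ring
      rw [e1, e2]
      simp only [PySem.List.pyGetD_natCast]
      rw [PySem.List.getD_map_range _ _ _ _ (by omega),
          PySem.List.getD_map_range _ _ _ _ (by omega),
          PySem.List.getD_map_range _ _ _ _ (by omega)]
      have hrec : pvD a b (s + 1) (k + 1)
          = if a.getD k ' ' == b.getD s ' ' then pvD a b s k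
            else 1 + min (pvD a b s (k + 1)) (pvD a b (s + 1) k) := by rw [pvD]
      rw [List.getD_eq_getElem _ _ hklt, List.getD_eq_getElem _ _ hs] at hrec
      rw [List.range_succ (n := k + 1), List.map_append]
      split_ifs with h <;>
        simp [hrec, h, Nat.cast_min]
    rw [hstep]
    have e3 : ((k : Int) + 1 + 1) = (((k + 1 : Nat)) : Int) + 1 := by push_cast; ring
    rw [e3]
    exact ih (k + 1) (by omega) (by omega)

lemma pvB_outer_loop (string_1 : String) (a b : List Char) (ha : a = string_1.toList) :
    ∀ (s : Nat), s ≤ b.length →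
    (PySem.List.enumerate (b.drop s) ((s : Int) + 1)).foldl (pvB_outer string_1) (pvRow a b s)
      = pvRow a b b.length := by
  intro s hs
  induction hd : b.length - s generalizing s with
  | zero =>
    have hse : s = b.length := by omega
    subst hse
    simp
  | succ r ih =>
    have hslt : s < b.length := by omega
    rw [List.drop_eq_getElem_cons hslt, PySem.List.enumerate_cons, List.foldl_cons]
    have hstep : pvB_outer string_1 (pvRow a b s) (((s : Int) + 1), b[s])
        = pvRow a b (s + 1) := by
      unfold pvB_outer
      have hinit : [((s : Int) + 1)]
          = (List.range (0 + 1)).map (fun j => (pvD a b (s + 1) j : Int)) := by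
        simp [pvD]
      have hen : (1 : Int) = ((0 : Nat) : Int) + 1 := by norm_num
      rw [← ha, hinit, hen, show a = a.drop 0 from rfl]
      exact pvB_inner_loop a b s hslt 0 (by omega)
    rw [hstep]
    have e3 : ((s : Int) + 1 + 1) = (((s + 1 : Nat)) : Int) + 1 := by push_cast; ring
    rw [e3]
    exact ih (s + 1) (by omega) (by omega)

lemma pvB_eq (string_1 string_2 : String) :
    insert_delete_distance_alt string_1 string_2
      = (pvD string_1.toList string_2.toList string_2.toList.length string_1.toList.length : Int) := by
  set a := string_1.toList with ha
  set b := string_2.toList with hb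
  simp only [insert_delete_distance_alt]
  have hinit : PySem.List.pyRange 0 (PySem.Str.len string_1 + 1) 1 = pvRow a b 0 := by
    rw [PySem.Str.len_eq, PySem.List.pyRange_one]
    unfold pvRow
    have : ((a.length : Int) + 1 - 0).toNat = a.length + 1 := by omega
    rw [this]
    apply pv_map_range_congr
    intro t ht
    simp [pvD]
  have hen2 : PySem.List.enumerate string_2.toList 1
      = PySem.List.enumerate (b.drop 0) (((0 : Nat) : Int) + 1) := by rw [hb]; norm_num
  rw [hinit, hen2, pvB_outer_loop string_1 a b ha 0 (by omega)]
  unfold pvRow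
  rw [List.range_succ, List.map_append]
  exact PySem.List.pyGetD_neg_one_append_singleton _ _ _

-- ===== VERDICT (by name: the statement is the Claim_ definition above) =====
theorem insert_delete_distance_spec : Claim_equal_insert_delete_distance := by
  intro s1 s2 _
  unfold Spec_insert_delete_distance
  rw [pvA_eq, pvB_eq]
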